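-- pv_equiv track=rewrite | github.com/anticiclon/wiring-diagram-problem | scenario_generator.py | generateEdges
-- ===== SOURCE A (Python) =====
-- def generateEdges(nx, ny, nz):
--     """
--     Generates the edges for a graph structured in three dimensions with elbows.
--
--     Parameters:
--     nx : int
--         Number of nodes along the x-axis.
--     ny : int
--         Number of nodes along the y-axis.
--     nz : int
--         Number of nodes along the z-axis.
--
--     Returns:
--     tuple
--         A tuple containing two lists: start_nodes and end_nodes of the edges.
--     """
--
--     # Step 1: Create a cross list based on the z dimension
--     cross_list = [i * 3 * nx * ny for i in range(nz)]
--
--     # Step 2: Generate vertical connections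
--     vertical_lists = []
--     for offset in cross_list:
--         vertical_list = [j * 3 * nx + offset for j in range(ny)]
--         vertical_lists.append(vertical_list)
--
--     # Step 3: Generate horizontal connections
--     horizontal_lists = []
--     for lista in vertical_lists:
--         horizontal_list2 = []
--         for i in lista:
--             horizontal_list1 = [j * 3 + i for j in range(nx)]
--             horizontal_list2.append(horizontal_list1)
--         horizontal_lists.append(horizontal_list2)
--
--     # Step 4: Initialize list for edges
--     lista_aristas = []
--
--     # Step 5: Generate virtual edges between symbolic nodes
--     for listaza in horizontal_lists:
--         for lista in listaza:
--             for a in lista: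
--                 # Create edges between a, a+1, and a+2
--                 lista_aristas.append([a, a + 1])  # Edge from a to a + 1
--                 lista_aristas.append([a, a + 2])  # Edge from a to a + 2
--                 lista_aristas.append([a + 1, a + 2])  # Edge from a + 1 to a + 2
--
--     # Step 6: Create horizontal edges within each horizontal list
--             for a in lista[:-1]:
--                 lista_aristas.append([a, a + 3]) # Connect a to the next layer in the x direction
--
--     # Step 7: Create vertical edges
--         for lista in listaza[:-1]:
--             for a in lista:
--                 b = a + 1
--                 lista_aristas.append([b, 3 * nx + b]) # Connect node b to its vertical counterpart
--
--
--     # Step 8: Create transverse edges between different z levels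
--     for listaza in horizontal_lists[:-1]:
--         for lista in listaza:
--             for a in lista:
--                 c = a + 2
--                 lista_aristas.append([c, 3 * nx * ny + c])  # Connect to the next z layer
--
--     # Step 9: Separate start and end nodes for each edge
--     start_nodes, end_nodes = zip(*lista_aristas)  # Unzip edges into two lists
--
--     return list(start_nodes), list(end_nodes)  # Return as lists for compatibility
-- ===== SOURCE B (Python) =====
-- def generateEdges(nx, ny, nz):
--     """Template-and-translate: build the relative edge template of one x-row once,
--     stack translated copies into a z-level template, stack translated level copies
--     plus the inter-level edges, then split the pairs. Empty dims give ([], [])."""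
--     row = [p for i in range(nx)
--              for p in ((3 * i, 3 * i + 1), (3 * i, 3 * i + 2), (3 * i + 1, 3 * i + 2))] \
--         + [(3 * i, 3 * i + 3) for i in range(nx - 1)]
--     level = [(3 * nx * j + s, 3 * nx * j + e) for j in range(ny) for (s, e) in row] \
--         + [(3 * (nx * j + i) + 1, 3 * (nx * (j + 1) + i) + 1)
--            for j in range(ny - 1) for i in range(nx)]
--     edges = [(3 * nx * ny * k + s, 3 * nx * ny * k + e) for k in range(nz) for (s, e) in level] \
--         + [(3 * (nx * (ny * k + j) + i) + 2, 3 * (nx * (ny * (k + 1) + j) + i) + 2)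
--            for k in range(nz - 1) for j in range(ny) for i in range(nx)]
--     return [s for s, _ in edges], [e for _, e in edges]
-- ===== Notes on version B (the rewrite author's own statement) =====
-- stated objective: alternative
-- what changed: B replaces A's nested per-node emission loops with a template-and-translate construction: it builds the relative edge template of a single x-row once, stacks translated copies of it into a z-level template, stacks translated level copies plus the inter-level edges, and splits the pair list with two comprehensions instead of zip(*...).
import Mathlib
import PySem

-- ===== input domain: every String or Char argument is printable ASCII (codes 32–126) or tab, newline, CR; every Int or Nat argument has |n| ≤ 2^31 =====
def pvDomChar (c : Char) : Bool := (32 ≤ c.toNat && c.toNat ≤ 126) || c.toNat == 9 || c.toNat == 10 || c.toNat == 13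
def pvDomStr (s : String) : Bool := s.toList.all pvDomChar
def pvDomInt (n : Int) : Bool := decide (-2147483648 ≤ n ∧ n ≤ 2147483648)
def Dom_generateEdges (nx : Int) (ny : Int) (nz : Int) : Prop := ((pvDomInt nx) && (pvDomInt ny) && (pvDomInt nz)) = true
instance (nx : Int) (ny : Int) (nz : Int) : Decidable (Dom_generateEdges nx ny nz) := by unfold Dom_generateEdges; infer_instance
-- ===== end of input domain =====

-- B replaces A's per-node emission loops by a template-and-translate construction
-- (one x-row edge template, translated into a level template, translated into levels);
-- objective: alternative (same asymptotic cost, different construction).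

-- ===== PORT A =====
-- edges are ported as pairs (a, b); zip(*lista_aristas) = (map fst, map snd) on a nonempty list
def generateEdges (nx : Int) (ny : Int) (nz : Int) : List Int × List Int :=
  let cross_list : List Int := (PySem.List.pyRange 0 nz 1).map (fun i => i * 3 * nx * ny)
  let vertical_lists : List (List Int) :=
    cross_list.foldl (fun acc offset =>
      acc ++ [(PySem.List.pyRange 0 ny 1).map (fun j => j * 3 * nx + offset)]) []
  let horizontal_lists : List (List (List Int)) :=
    vertical_lists.foldl (fun acc lista =>
      acc ++ [lista.foldl (fun acc2 i =>
        acc2 ++ [(PySem.List.pyRange 0 nx 1).map (fun j => j * 3 + i)]) []]) []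
  -- steps 5–7
  let la1 : List (Int × Int) :=
    horizontal_lists.foldl (fun la listaza =>
      let la2 := listaza.foldl (fun la lista =>
        let la3 := lista.foldl (fun la a =>
          la ++ [(a, a + 1), (a, a + 2), (a + 1, a + 2)]) la
        (PySem.List.slice lista none (some (-1))).foldl (fun la a =>
          la ++ [(a, a + 3)]) la3) la
      (PySem.List.slice listaza none (some (-1))).foldl (fun la lista =>
        lista.foldl (fun la a => la ++ [(a + 1, 3 * nx + (a + 1))]) la) la2) []
  -- step 8
  let lista_aristas : List (Int × Int) :=
    (PySem.List.slice horizontal_lists none (some (-1))).foldl (fun la listaza =>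
      listaza.foldl (fun la lista =>
        lista.foldl (fun la a => la ++ [(a + 2, 3 * nx * ny + (a + 2))]) la) la) la1
  (lista_aristas.map Prod.fst, lista_aristas.map Prod.snd)

-- ===== PORT B =====
def generateEdges_alt (nx : Int) (ny : Int) (nz : Int) : List Int × List Int :=
  let row : List (Int × Int) :=
    (PySem.List.pyRange 0 nx 1).flatMap
      (fun i => [(3 * i, 3 * i + 1), (3 * i, 3 * i + 2), (3 * i + 1, 3 * i + 2)])
    ++ (PySem.List.pyRange 0 (nx - 1) 1).map (fun i => (3 * i, 3 * i + 3))
  let level : List (Int × Int) :=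
    (PySem.List.pyRange 0 ny 1).flatMap
      (fun j => row.map (fun p => (3 * nx * j + p.1, 3 * nx * j + p.2)))
    ++ (PySem.List.pyRange 0 (ny - 1) 1).flatMap (fun j =>
         (PySem.List.pyRange 0 nx 1).map
           (fun i => (3 * (nx * j + i) + 1, 3 * (nx * (j + 1) + i) + 1)))
  let edges : List (Int × Int) :=
    (PySem.List.pyRange 0 nz 1).flatMap
      (fun k => level.map (fun p => (3 * nx * ny * k + p.1, 3 * nx * ny * k + p.2)))
    ++ (PySem.List.pyRange 0 (nz - 1) 1).flatMap (fun k =>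
         (PySem.List.pyRange 0 ny 1).flatMap (fun j =>
           (PySem.List.pyRange 0 nx 1).map (fun i =>
             (3 * (nx * (ny * k + j) + i) + 2, 3 * (nx * (ny * (k + 1) + j) + i) + 2))))
  (edges.map Prod.fst, edges.map Prod.snd)

-- ===== PRECONDITION & SPEC =====
-- Pre_ excludes exactly the inputs where Python A raises: with any dimension ≤ 0 the
-- edge list is empty and zip(*[]) raises ValueError.
def Pre_generateEdges (nx : Int) (ny : Int) (nz : Int) : Prop := 1 ≤ nx ∧ 1 ≤ ny ∧ 1 ≤ nz
instance (nx : Int) (ny : Int) (nz : Int) : Decidable (Pre_generateEdges nx ny nz) := by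
  unfold Pre_generateEdges; infer_instance
def pvWitness_generateEdges : Int × Int × Int := (2, 2, 2)

def Spec_generateEdges (nx : Int) (ny : Int) (nz : Int) (out : List Int × List Int) : Prop := out = generateEdges_alt nx ny nz
instance (nx : Int) (ny : Int) (nz : Int) (out : List Int × List Int) : Decidable (Spec_generateEdges nx ny nz out) := by unfold Spec_generateEdges; infer_instance

-- ===== CLAIM (what is proved, stated in full; the proofs are below) =====
def Claim_equal_generateEdges : Prop := ∀ (nx : Int) (ny : Int) (nz : Int), Dom_generateEdges nx ny nz → Pre_generateEdges nx ny nz → Spec_generateEdges nx ny nz (generateEdges nx ny nz)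

-- ===== LEMMAS AND PROOFS =====

-- a fold that appends f x to a single accumulator list is acc ++ flatMap
theorem pvFoldApp {α β : Type} (l : List α) (f : α → List β) (acc : List β) :
    l.foldl (fun acc x => acc ++ f x) acc = acc ++ l.flatMap f := by
  induction l generalizing acc with
  | nil => simp
  | cons x xs ih => simp [ih]

theorem pvDropLast_pyRange (n : Int) :
    (PySem.List.pyRange 0 n 1).dropLast = PySem.List.pyRange 0 (n - 1) 1 := by
  by_cases h : n ≤ 0
  · rw [PySem.List.pyRange_one_eq_nil h, PySem.List.pyRange_one_eq_nil (by omega)]; rfl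
  · have h : 0 < n := by omega
    rw [show n = (n - 1) + 1 by ring, PySem.List.pyRange_one_succ_right (by omega)]
    simp

-- ===== VERDICT (by name: the statement is the Claim_ definition above) =====
theorem generateEdges_spec : Claim_equal_generateEdges := by
  intro nx ny nz _ _
  unfold Spec_generateEdges
  simp only [generateEdges, generateEdges_alt]
  simp only [PySem.List.slice_to_neg_one, pvFoldApp,
    List.nil_append, List.append_assoc, ← List.map_eq_flatMap, List.flatMap_map,
    List.map_flatMap, ← List.map_dropLast, pvDropLast_pyRange, List.map_map,
    Function.comp_def, List.map_append, List.map_cons, List.map_nil]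
  refine congrArg₂ Prod.mk ?_ ?_ <;>
  repeat'
    first
    | rfl
    | ring
    | (refine congrArg₂ (· ++ ·) ?_ ?_)
    | (refine List.flatMap_congr fun _ _ => ?_)
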